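-- pv_equiv track=rewrite | github.com/Michal-Szlazak/SentimentAnalysis | src/jsonl_to_csv.py | collect_fieldnames
-- ===== SOURCE A (Python) =====
-- def collect_fieldnames(rows: list[dict]) -> list[str]:
--     fieldnames: list[str] = []
--     seen: set[str] = set()
--     for row in rows:
--         for key in row.keys():
--             if key not in seen:
--                 seen.add(key)
--                 fieldnames.append(key)
--     return fieldnames
-- ===== SOURCE B (Python) =====
-- def collect_fieldnames(rows: list[dict]) -> list[str]:
--     flat = [key for row in rows for key in row]
--     result: list[str] = []
--     for key in reversed(flat):
--         result = [key] + [k for k in result if k != key]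
--     return result
-- ===== Notes on version B (the rewrite author's own statement) =====
-- stated objective: alternative
-- what changed: Instead of one forward pass maintaining a list plus a set with a membership branch, B flattens all keys into one list and builds the answer back-to-front: a right-fold that prepends each key and filters its duplicates out of the partial result, so no auxiliary membership structure exists at all.
import Mathlib
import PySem

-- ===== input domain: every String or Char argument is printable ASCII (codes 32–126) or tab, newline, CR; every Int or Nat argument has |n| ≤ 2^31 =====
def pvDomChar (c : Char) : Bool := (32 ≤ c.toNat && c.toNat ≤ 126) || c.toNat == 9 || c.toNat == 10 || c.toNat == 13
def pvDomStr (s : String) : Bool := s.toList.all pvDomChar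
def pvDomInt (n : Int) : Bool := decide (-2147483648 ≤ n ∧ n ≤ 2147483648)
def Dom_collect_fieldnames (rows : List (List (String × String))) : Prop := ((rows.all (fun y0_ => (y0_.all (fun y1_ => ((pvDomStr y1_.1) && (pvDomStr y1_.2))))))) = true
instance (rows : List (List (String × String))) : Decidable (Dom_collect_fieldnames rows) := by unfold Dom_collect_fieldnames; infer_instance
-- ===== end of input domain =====

-- B replaces A's forward pass with a list+set accumulator by a flatten followed by a
-- back-to-front build that filters each key's later duplicates out of the partial result.

-- ===== PORT A =====
-- state = (fieldnames, seen); inner loop over a row's keys, outer loop over rows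
def collect_fieldnames (rows : List (List (String × String))) : List String :=
  (rows.foldl
    (fun st row =>
      row.foldl
        (fun st p =>
          if PySem.Set.contains st.2 p.1 then st
          else (st.1 ++ [p.1], PySem.Set.add st.2 p.1))
        st)
    ([], PySem.Set.empty)).1

-- ===== PORT B =====
-- flat = [key for row in rows for key in row]
-- result = []; for key in reversed(flat): result = [key] + [k for k in result if k != key]
def collect_fieldnames_alt (rows : List (List (String × String))) : List String :=
  let flat := rows.flatMap (fun row => row.map (·.1))
  flat.reverse.foldl (fun result key => key :: result.filter (fun k => k ≠ key)) []

-- ===== PRECONDITION & SPEC =====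
def Spec_collect_fieldnames (rows : List (List (String × String))) (out : List String) : Prop := out = collect_fieldnames_alt rows
instance (rows : List (List (String × String))) (out : List String) : Decidable (Spec_collect_fieldnames rows out) := by unfold Spec_collect_fieldnames; infer_instance

-- ===== CLAIM (what is proved, stated in full; the proofs are below) =====
def Claim_equal_collect_fieldnames : Prop := ∀ (rows : List (List (String × String))), Dom_collect_fieldnames rows → Spec_collect_fieldnames rows (collect_fieldnames rows)

-- ===== LEMMAS AND PROOFS =====

-- B's loop, read as structural recursion on the flat key list (foldl over the reverse = foldr)
def pvDedupRec : List String → List String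
  | [] => []
  | a :: l => a :: (pvDedupRec l).filter (fun k => k ≠ a)

theorem pvB_eq_dedupRec (l : List String) :
    l.reverse.foldl (fun result key => key :: result.filter (fun k => k ≠ key)) []
      = pvDedupRec l := by
  rw [List.foldl_reverse]
  induction l with
  | nil => rfl
  | cons a t ih => rw [List.foldr_cons, ih]; rfl

-- A's inner loop from a state whose components coincide: both become Set.update s (keys of row)
theorem pvA_inner (row : List (String × String)) (s : List String) :
    row.foldl
      (fun st p =>
        if PySem.Set.contains st.2 p.1 then st
        else (st.1 ++ [p.1], PySem.Set.add st.2 p.1))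
      (s, s)
    = (PySem.Set.update s (row.map (·.1)), PySem.Set.update s (row.map (·.1))) := by
  induction row generalizing s with
  | nil => simp [PySem.Set.update]
  | cons p rest ih =>
    simp only [List.foldl_cons, List.map_cons, PySem.Set.update] at ih ⊢
    by_cases h : p.1 ∈ s
    · have hadd : PySem.Set.add s p.1 = s := by simp [PySem.Set.add, h]
      simpa [h, hadd] using ih s
    · have hadd : PySem.Set.add s p.1 = s ++ [p.1] := by simp [PySem.Set.add, h]
      simpa [h, hadd] using ih (s ++ [p.1])

-- A's whole fold: both components equal a fold of Set.update over the rows' key lists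
theorem pvA_fold (rows : List (List (String × String))) (s : List String) :
    rows.foldl
      (fun st row =>
        row.foldl
          (fun st p =>
            if PySem.Set.contains st.2 p.1 then st
            else (st.1 ++ [p.1], PySem.Set.add st.2 p.1))
          st)
      (s, s)
    = (rows.foldl (fun s row => PySem.Set.update s (row.map (·.1))) s,
       rows.foldl (fun s row => PySem.Set.update s (row.map (·.1))) s) := by
  induction rows generalizing s with
  | nil => rfl
  | cons row rest ih => simp only [List.foldl_cons, pvA_inner, ih]

-- folding Set.update row by row is Set.update of the flattened key list
theorem pvUpdate_flat (rows : List (List (String × String))) (s : List String) :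
    rows.foldl (fun s row => PySem.Set.update s (row.map (·.1))) s
      = PySem.Set.update s (rows.flatMap (fun row => row.map (·.1))) := by
  induction rows generalizing s with
  | nil => rfl
  | cons row rest ih =>
    simp only [List.foldl_cons, List.flatMap_cons, PySem.Set.update, List.foldl_append] at ih ⊢
    exact ih _

-- Set.update s l appends, in order, the first occurrences of l's keys not already in s
theorem pvUpdate_eq_dedupRec (l : List String) (s : List String) :
    PySem.Set.update s l = s ++ (pvDedupRec l).filter (fun x => x ∉ s) := by
  induction l generalizing s with
  | nil => simp [PySem.Set.update, pvDedupRec]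
  | cons a t ih =>
    simp only [PySem.Set.update, List.foldl_cons, pvDedupRec] at ih ⊢
    rw [List.filter_cons]
    by_cases h : a ∈ s
    · have hadd : PySem.Set.add s a = s := by simp [PySem.Set.add, h]
      have hfil : ((pvDedupRec t).filter (fun k => k ≠ a)).filter (fun x => x ∉ s)
          = (pvDedupRec t).filter (fun x => x ∉ s) := by
        rw [List.filter_filter]
        apply List.filter_congr
        intro x _
        by_cases hx : x = a
        · subst hx; simp [h]
        · simp [hx]
      rw [hadd, ih s, if_neg (by simp [h]), hfil]
    · have hadd : PySem.Set.add s a = s ++ [a] := by simp [PySem.Set.add, h]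
      have hfil : (pvDedupRec t).filter (fun x => x ∉ s ++ [a])
          = ((pvDedupRec t).filter (fun k => k ≠ a)).filter (fun x => x ∉ s) := by
        rw [List.filter_filter]
        apply List.filter_congr
        intro x _
        by_cases hx : x = a
        · subst hx; simp
        · simp [hx]
      rw [hadd, ih (s ++ [a]), hfil, if_pos (by simp [h])]
      simp

-- ===== VERDICT (by name: the statement is the Claim_ definition above) =====
theorem collect_fieldnames_spec : Claim_equal_collect_fieldnames := by
  intro rows _
  show _ = _
  unfold collect_fieldnames collect_fieldnames_alt
  rw [pvB_eq_dedupRec,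
    show (([], PySem.Set.empty) : List String × PySem.Set String)
        = (([] : List String), ([] : List String)) from rfl,
    pvA_fold, pvUpdate_flat, pvUpdate_eq_dedupRec]
  simp
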